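-- pv_equiv track=rewrite | github.com/HelloSSIFI/HelloWorld | programmers/Lv3_스타_수열/s1_kcw0360.py | solution
-- ===== SOURCE A (Python) =====
-- from collections import Counter
--
-- def solution(a):
--     answer = -1
--     num_cnt = Counter(a)
--
--     for num in num_cnt:
--         if num_cnt[num] <= answer:    # 스타수열의 공통원소의 개수가 answer보다 작으면 더이상 확인할 필요가 없다.
--             continue
--
--         cnt = 0
--         idx = 0
--         while idx < len(a)-1:
--             # 공통된 num값이 없는 경우 / 각 집합내 숫자가 다르다는 조건을 만족하지 않는 경우
--             if a[idx] != num != a[idx+1] or a[idx] == a[idx+1]: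
--                 idx += 1
--                 continue
--
--             cnt += 1    # 원소 사용 횟수 +1
--             idx += 2    # 다음 배열 탐색
--
--         answer = max(answer, cnt)
--
--     if answer == -1:
--         return 0
--     return answer * 2
-- ===== SOURCE B (Python) =====
-- def solution(a):
--     ptr = {}   # per value: first index from which its greedy scan may take a pair
--     cnt = {}   # per value: pairs taken so far
--     for i in range(len(a) - 1):
--         x, y = a[i], a[i + 1]
--         if x == y:
--             continue
--         for num in (x, y):
--             if ptr.get(num, 0) <= i:
--                 cnt[num] = cnt.get(num, 0) + 1
--                 ptr[num] = i + 2
--     return 2 * max(cnt.values(), default=0)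
-- ===== Notes on version B (the rewrite author's own statement) =====
-- stated objective: faster
-- what changed: A rescans the whole list once per distinct value (greedy pair scan per Counter key); B makes a single left-to-right pass over adjacent pairs, advancing every value's greedy pair-pointer and pair-count simultaneously in two dictionaries, then takes the max count.
import Mathlib
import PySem

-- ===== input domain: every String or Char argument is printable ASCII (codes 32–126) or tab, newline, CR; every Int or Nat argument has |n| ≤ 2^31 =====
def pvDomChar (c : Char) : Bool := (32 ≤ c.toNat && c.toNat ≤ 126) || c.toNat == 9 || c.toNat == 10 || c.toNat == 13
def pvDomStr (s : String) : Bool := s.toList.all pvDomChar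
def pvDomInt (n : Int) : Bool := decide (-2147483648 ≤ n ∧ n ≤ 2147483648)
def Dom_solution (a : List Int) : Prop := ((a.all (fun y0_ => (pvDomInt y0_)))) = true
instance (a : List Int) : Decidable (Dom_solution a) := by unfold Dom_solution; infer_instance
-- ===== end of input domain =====

-- B replaces A's per-distinct-value rescan of the whole list by ONE left-to-right pass that
-- advances every value's greedy pair-pointer simultaneously in two dictionaries (objective: faster).

-- ===== PORT A =====
-- A's inner 'while idx < len(a)-1' loop for one candidate value num; idx starts at 0 and only
-- grows, so 'a[idx]'/'a[idx+1]' are the always-in-range accesses List.getD idx / (idx+1) (exact here).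
def scanA (a : List Int) (num : Int) (idx : Nat) (cnt : Int) : Int :=
  if idx + 1 < a.length then
    if (a.getD idx 0 ≠ num ∧ num ≠ a.getD (idx + 1) 0) ∨ a.getD idx 0 = a.getD (idx + 1) 0 then
      scanA a num (idx + 1) cnt
    else
      scanA a num (idx + 2) (cnt + 1)
  else cnt
termination_by a.length - idx

def solution (a : List Int) : Int :=
  -- Counter(a): first-occurrence key order, counts incremented in place
  let numCnt : PySem.Dict Int Int :=
    a.foldl (fun d x => d.insert x (d.getD x 0 + 1)) PySem.Dict.empty
  -- 'for num in num_cnt:' with the 'if num_cnt[num] <= answer: continue' pruning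
  -- (num ∈ keys, so num_cnt[num] never raises; ported as getD num 0)
  let answer : Int :=
    numCnt.keys.foldl
      (fun answer num =>
        if numCnt.getD num 0 ≤ answer then answer
        else max answer (scanA a num 0 0))
      (-1)
  if answer = -1 then 0 else answer * 2

-- ===== PORT B =====
-- one step of B's single pass: at pair (a[i], a[i+1]) update ptr/cnt for both endpoint values
-- ('for num in (x, y)' unrolled; i comes from range(len(a)-1), so getD is the exact a[i])
def stepB (a : List Int) (s : PySem.Dict Int Int × PySem.Dict Int Int) (i : Nat) :
    PySem.Dict Int Int × PySem.Dict Int Int :=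
  let x := a.getD i 0
  let y := a.getD (i + 1) 0
  if x = y then s
  else
    let s1 := if s.1.getD x 0 ≤ (i : Int) then
        (s.1.insert x ((i : Int) + 2), s.2.insert x (s.2.getD x 0 + 1)) else s
    if s1.1.getD y 0 ≤ (i : Int) then
      (s1.1.insert y ((i : Int) + 2), s1.2.insert y (s1.2.getD y 0 + 1)) else s1

def solution_alt (a : List Int) : Int :=
  let st := (List.range (a.length - 1)).foldl (stepB a) (PySem.Dict.empty, PySem.Dict.empty)
  -- max(cnt.values(), default=0)
  2 * PySem.List.maxD st.2.values (fun v => v) 0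

-- ===== PRECONDITION & SPEC =====
def Spec_solution (a : List Int) (out : Int) : Prop := out = solution_alt a
instance (a : List Int) (out : Int) : Decidable (Spec_solution a out) := by unfold Spec_solution; infer_instance

-- ===== CLAIM (what is proved, stated in full; the proofs are below) =====
def Claim_equal_solution : Prop := ∀ (a : List Int), Dom_solution a → Spec_solution a (solution a)

-- ===== LEMMAS AND PROOFS =====

-- per-value abstraction of one step of B's pass: (pointer, count) for a fixed value num
def stepN (a : List Int) (num : Int) (s : Int × Int) (i : Nat) : Int × Int :=
  if a.getD i 0 ≠ a.getD (i + 1) 0 ∧ (a.getD i 0 = num ∨ a.getD (i + 1) 0 = num) ∧ s.1 ≤ (i : Int)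
  then ((i : Int) + 2, s.2 + 1) else s

lemma stepB_tracks (a : List Int) (i : Nat)
    (st : PySem.Dict Int Int × PySem.Dict Int Int) (f : Int → Int × Int)
    (h : ∀ num, st.1.getD num 0 = (f num).1 ∧ st.2.getD num 0 = (f num).2) :
    ∀ num, (stepB a st i).1.getD num 0 = (stepN a num (f num) i).1 ∧
           (stepB a st i).2.getD num 0 = (stepN a num (f num) i).2 := by
  intro num
  simp only [stepB, stepN]
  generalize a.getD i 0 = x
  generalize a.getD (i + 1) 0 = y
  obtain ⟨h1, h2⟩ := h num
  obtain ⟨hx1, hx2⟩ := h x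
  obtain ⟨hy1, hy2⟩ := h y
  by_cases hxy : x = y
  · subst hxy
    simp [h1, h2]
  · have hyx : y ≠ x := fun e => hxy e.symm
    simp only [if_neg hxy, ne_eq, hxy, not_false_eq_true, true_and,
      PySem.Dict.getD_insert, if_neg hyx]
    by_cases hnx : num = x <;> by_cases hny : num = y <;>
      split_ifs <;> simp_all [PySem.Dict.getD_insert] <;> omega

lemma foldN_eq_scan (a : List Int) (num : Int) :
    ∀ (m j : Nat) (p c : Int), 0 ≤ p →
    (j + m + 1 = a.length ∨ (m = 0 ∧ a.length ≤ j + 1)) →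
    ((List.range' j m).foldl (stepN a num) (p, c)).2 = scanA a num (max p.toNat j) c := by
  intro m
  induction m with
  | zero =>
    intro j p c hp hlen
    rw [List.range'_zero, List.foldl_nil, scanA]
    rw [if_neg (by omega)]
  | succ m ih =>
    intro j p c hp hlen
    have hlen' : j + m + 2 = a.length := by omega
    have hj1 : j + 1 < a.length := by omega
    rw [List.range'_succ, List.foldl_cons]
    by_cases hcond : a.getD j 0 ≠ a.getD (j + 1) 0 ∧
        (a.getD j 0 = num ∨ a.getD (j + 1) 0 = num) ∧ p ≤ (j : Int)
    · -- pair taken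
      rw [show stepN a num (p, c) j = ((j : Int) + 2, c + 1) from by
        simp only [stepN]; rw [if_pos hcond]]
      rw [ih (j + 1) ((j : Int) + 2) (c + 1) (by omega) (by omega)]
      have hmax1 : max ((j : Int) + 2).toNat (j + 1) = j + 2 := by omega
      have hmax0 : max p.toNat j = j := by
        have := hcond.2.2; omega
      rw [hmax1, hmax0]
      conv_rhs => rw [scanA]
      rw [if_pos hj1, if_neg (by
        rintro (⟨e1, e2⟩ | e)
        · rcases hcond.2.1 with e | e'
          exacts [e1 e, e2 e'.symm]
        · exact hcond.1 e)]
    · -- pair not taken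
      rw [show stepN a num (p, c) j = (p, c) from by
        simp only [stepN]; rw [if_neg hcond]]
      rw [ih (j + 1) p c hp (by omega)]
      by_cases hpj : p ≤ (j : Int)
      · -- pointer already passed: A also skips this pair
        have hmax0 : max p.toNat j = j := by omega
        have hmax1 : max p.toNat (j + 1) = j + 1 := by omega
        rw [hmax0, hmax1]
        conv_rhs => rw [scanA]
        rw [if_pos hj1, if_pos (by
          by_contra hc
          push_neg at hc
          obtain ⟨himp, hne⟩ := hc
          refine hcond ⟨hne, ?_, hpj⟩
          by_cases he : a.getD j 0 = num
          · exact Or.inl he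
          · exact Or.inr (himp he).symm)]
      · have : max p.toNat j = max p.toNat (j + 1) := by omega
        rw [this]

lemma scan_ge (a : List Int) (num : Int) :
    ∀ (m j : Nat) (c : Int), a.length - j ≤ m → c ≤ scanA a num j c := by
  intro m
  induction m with
  | zero =>
    intro j c hm
    rw [scanA, if_neg (by omega)]
  | succ m ih =>
    intro j c hm
    rw [scanA]
    split_ifs with h1 h2
    · exact ih (j + 1) c (by omega)
    · exact le_trans (by omega) (ih (j + 2) (c + 1) (by omega))
    · exact le_rfl

lemma scan_le_count (a : List Int) (num : Int) :
    ∀ (m j : Nat) (c : Int), a.length - j ≤ m →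
    scanA a num j c ≤ c + ((a.drop j).count num : Int) := by
  intro m
  induction m with
  | zero =>
    intro j c hm
    rw [scanA, if_neg (by omega)]
    have h0 : (a.drop j).count num = (0 : Nat) := by
      rw [List.drop_eq_nil_of_le (by omega), List.count_nil]
    rw [h0]
    simp
  | succ m ih =>
    intro j c hm
    rw [scanA]
    split_ifs with h1 h2
    · -- skip: count over drop j ≥ count over drop (j+1)
      refine le_trans (ih (j + 1) c (by omega)) ?_
      have hdrop : a.drop j = a[j] :: a.drop (j + 1) := List.drop_eq_getElem_cons (by omega)
      rw [hdrop, List.count_cons]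
      split_ifs <;> push_cast <;> omega
    · -- take: one of a[j], a[j+1] equals num
      refine le_trans (ih (j + 2) (c + 1) (by omega)) ?_
      have hdropj : a.drop j = a[j] :: a.drop (j + 1) := List.drop_eq_getElem_cons (by omega)
      have hdropj1 : a.drop (j + 1) = a[j + 1] :: a.drop (j + 2) := List.drop_eq_getElem_cons (by omega)
      have hone : a[j] = num ∨ a[j + 1] = num := by
        push_neg at h2
        have e1 := h2.1
        have hg1 : a.getD j 0 = a[j] := List.getD_eq_getElem a 0 (by omega)
        have hg2 : a.getD (j + 1) 0 = a[j + 1] := List.getD_eq_getElem a 0 (by omega)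
        by_cases he : a[j] = num
        · exact Or.inl he
        · refine Or.inr ?_
          have := e1 (by rw [hg1]; exact he)
          rw [hg2] at this; exact this.symm
      rw [hdropj, List.count_cons, hdropj1, List.count_cons]
      rcases hone with e | e <;> simp [e] <;> split_ifs <;> push_cast <;> omega
    · -- loop over: count nonneg
      have : (0 : Int) ≤ ((a.drop j).count num : Int) := by positivity
      omega

lemma keys_inv_insert (a : List Int) (d : PySem.Dict Int Int) (k v : Int)
    (hd : d.keys.Nodup ∧ ∀ x ∈ d.keys, x ∈ a) (hk : k ∈ a) :
    (d.insert k v).keys.Nodup ∧ ∀ x ∈ (d.insert k v).keys, x ∈ a := by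
  refine ⟨PySem.Dict.nodup_keys_insert _ _ _ hd.1, ?_⟩
  intro x hx
  rcases (PySem.Dict.mem_keys_insert _ _ _ _).mp hx with rfl | hx
  exacts [hk, hd.2 x hx]

lemma stepB_keys (a : List Int) (i : Nat) (hi : i + 1 < a.length)
    (st : PySem.Dict Int Int × PySem.Dict Int Int)
    (h : st.2.keys.Nodup ∧ ∀ k ∈ st.2.keys, k ∈ a) :
    (stepB a st i).2.keys.Nodup ∧ ∀ k ∈ (stepB a st i).2.keys, k ∈ a := by
  have hx : a.getD i 0 ∈ a := by
    rw [List.getD_eq_getElem a 0 (by omega)]; exact List.getElem_mem _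
  have hy : a.getD (i + 1) 0 ∈ a := by
    rw [List.getD_eq_getElem a 0 hi]; exact List.getElem_mem _
  simp only [stepB]
  split_ifs <;>
    first
      | exact h
      | exact keys_inv_insert a _ _ _ h hx
      | exact keys_inv_insert a _ _ _ h hy
      | exact keys_inv_insert a _ _ _ (keys_inv_insert a _ _ _ h hx) hy

lemma foldB_keys (a : List Int) (l : List Nat) (hl : ∀ i ∈ l, i + 1 < a.length)
    (st : PySem.Dict Int Int × PySem.Dict Int Int)
    (hk : st.2.keys.Nodup ∧ ∀ k ∈ st.2.keys, k ∈ a) :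
    ((l.foldl (stepB a) st).2.keys.Nodup ∧ ∀ k ∈ (l.foldl (stepB a) st).2.keys, k ∈ a) := by
  induction l generalizing st with
  | nil => exact hk
  | cons b t ih =>
    rw [List.foldl_cons]
    exact ih (fun i hi => hl i (by simp [hi])) _
      (stepB_keys a b (hl b (by simp)) st hk)

lemma prune_free (a : List Int) (numCnt : PySem.Dict Int Int)
    (hcnt : ∀ num, numCnt.getD num 0 = (a.count num : Int))
    (hle : ∀ num, scanA a num 0 0 ≤ (a.count num : Int)) :
    ∀ (keys : List Int) (a0 : Int),
    keys.foldl (fun ans num => if numCnt.getD num 0 ≤ ans then ans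
                               else max ans (scanA a num 0 0)) a0
      = keys.foldl (fun ans num => max ans (scanA a num 0 0)) a0 := by
  intro keys
  induction keys with
  | nil => intro a0; rfl
  | cons k t ih =>
    intro a0
    rw [List.foldl_cons, List.foldl_cons, ih]
    by_cases hc : numCnt.getD k 0 ≤ a0
    · rw [if_pos hc]
      have : max a0 (scanA a k 0 0) = a0 := by
        have h1 := hle k
        have h2 := hcnt k
        omega
      rw [this]
    · rw [if_neg hc]

lemma foldB_tracks (a : List Int) (l : List Nat)
    (st : PySem.Dict Int Int × PySem.Dict Int Int) (f : Int → Int × Int)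
    (h : ∀ num, st.1.getD num 0 = (f num).1 ∧ st.2.getD num 0 = (f num).2) :
    ∀ num, (l.foldl (stepB a) st).1.getD num 0 = (l.foldl (stepN a num) (f num)).1 ∧
           (l.foldl (stepB a) st).2.getD num 0 = (l.foldl (stepN a num) (f num)).2 := by
  induction l generalizing st f with
  | nil => exact h
  | cons b t ih =>
    intro num
    rw [List.foldl_cons, List.foldl_cons]
    exact ih (stepB a st b) (fun num => stepN a num (f num) b) (stepB_tracks a b st f h) num

lemma cnt_getD_eq_scan (a : List Int) (num : Int) :
    ((List.range (a.length - 1)).foldl (stepB a) (PySem.Dict.empty, PySem.Dict.empty)).2.getD num 0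
      = scanA a num 0 0 := by
  have h := foldB_tracks a (List.range (a.length - 1))
    (PySem.Dict.empty, PySem.Dict.empty) (fun _ => ((0 : Int), (0 : Int)))
    (fun num => ⟨PySem.Dict.getD_empty num 0, PySem.Dict.getD_empty num 0⟩) num
  rw [h.2, List.range_eq_range',
    foldN_eq_scan a num (a.length - 1) 0 0 0 le_rfl (by omega)]
  rfl

lemma scanv_nonneg (a : List Int) (num : Int) : 0 ≤ scanA a num 0 0 :=
  scan_ge a num a.length 0 0 (by omega)

lemma main_eq (a : List Int) : solution a = solution_alt a := by
  by_cases ha : a = []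
  · subst ha; rfl
  · simp only [solution, solution_alt]
    set numCnt : PySem.Dict Int Int := a.foldl (fun d x => d.insert x (d.getD x 0 + 1)) PySem.Dict.empty with hNC
    set st := (List.range (a.length - 1)).foldl (stepB a) (PySem.Dict.empty, PySem.Dict.empty)
      with hst
    have hcnt : ∀ num, numCnt.getD num 0 = (a.count num : Int) := by
      intro num
      rw [hNC, PySem.Dict.getD_foldl_insert_add_one a PySem.Dict.empty num,
        PySem.Dict.getD_empty]
      ring
    have hscan_le : ∀ num, scanA a num 0 0 ≤ (a.count num : Int) := by
      intro num
      have h := scan_le_count a num a.length 0 0 (by omega)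
      simpa using h
    have hKmem : ∀ k, k ∈ numCnt.keys ↔ k ∈ a := by
      intro k
      rw [hNC, PySem.Dict.keys_foldl_insert]
      rw [show PySem.Dict.empty.keys = ([] : List Int) from PySem.Dict.keys_empty] at *
      simp [PySem.Set.mem_update]
    have hB : ∀ num, st.2.getD num 0 = scanA a num 0 0 := fun num => by
      rw [hst]; exact cnt_getD_eq_scan a num
    have hkeysB : st.2.keys.Nodup ∧ ∀ k ∈ st.2.keys, k ∈ a := by
      rw [hst]
      refine foldB_keys a _ (fun i hi => by have := List.mem_range.mp hi; omega) _ ?_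
      rw [show (PySem.Dict.empty, PySem.Dict.empty).2.keys = ([] : List Int) from
        PySem.Dict.keys_empty]
      exact ⟨List.nodup_nil, by simp⟩
    have hvals : st.2.values = st.2.keys.map (fun k => scanA a k 0 0) := by
      rw [PySem.Dict.values_eq_map_keys st.2 hkeysB.1 0]
      exact List.map_congr_left (fun k _ => hB k)
    rw [prune_free a numCnt hcnt hscan_le]
    have hfold : numCnt.keys.foldl (fun ans num => max ans (scanA a num 0 0)) (-1)
        = (numCnt.keys.map (fun num => scanA a num 0 0)).foldl max (-1) := by
      rw [List.foldl_map]
    rw [hfold]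
    set LA := numCnt.keys.map (fun num => scanA a num 0 0) with hLA
    set F := LA.foldl max (-1) with hF
    -- F is at least one nonnegative scan value, hence ≥ 0
    obtain ⟨a0, t0, rfl⟩ : ∃ x xs, a = x :: xs := by
      cases a with
      | nil => exact absurd rfl ha
      | cons x xs => exact ⟨x, xs, rfl⟩
    have hk0 : a0 ∈ numCnt.keys := (hKmem a0).mpr (by simp)
    have hF0 : 0 ≤ F := by
      have hmem : scanA (a0 :: t0) a0 0 0 ∈ LA := by
        rw [hLA]; exact List.mem_map_of_mem hk0
      exact le_trans (scanv_nonneg _ _) ((PySem.List.le_foldl_max LA (-1)).2 _ hmem)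
    have hFmem : F ∈ LA := by
      rcases PySem.List.foldl_max_mem LA (-1) with h | h
      · exfalso; rw [← hF] at h; omega
      · exact h
    rcases hv : st.2.values with _ | ⟨v, t⟩
    · -- no value ever got a pair: every scan is 0
      have hkeys_nil : st.2.keys = [] := by
        have := hvals; rw [hv] at this
        exact List.map_eq_nil_iff.mp this.symm
      have hzero : ∀ num, scanA (a0 :: t0) num 0 0 = 0 := by
        intro num
        rw [← hB num, PySem.Dict.getD_of_not_contains]
        rw [← Bool.not_eq_true, PySem.Dict.contains_iff_mem_keys, hkeys_nil]
        simp
      have hFz : F = 0 := by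
        obtain ⟨k, _, hk⟩ := List.mem_map.mp hFmem
        rw [← hk, hzero k]
      rw [hFz]
      norm_num [PySem.List.maxD, PySem.List.max?]
    · -- some value got a pair: both sides are the maximum scan value
      have hM : PySem.List.maxD (v :: t) (fun v => v) 0 = t.foldl max v := by
        rw [PySem.List.maxD, PySem.List.max?_id_cons, Option.getD_some]
      set M := t.foldl max v with hMdef
      have hvt : v :: t = st.2.keys.map (fun k => scanA (a0 :: t0) k 0 0) := by
        rw [← hv, hvals]
      have hMle : M ≤ F := by
        have hMmem : M ∈ v :: t := by
          rcases PySem.List.foldl_max_mem t v with h | h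
          · rw [hMdef, h]; simp
          · exact List.mem_cons_of_mem _ h
        rw [hvt] at hMmem
        obtain ⟨k, hk, hkeq⟩ := List.mem_map.mp hMmem
        have : scanA (a0 :: t0) k 0 0 ∈ LA := by
          rw [hLA]
          exact List.mem_map_of_mem ((hKmem k).mpr (hkeysB.2 k hk))
        rw [← hkeq]
        exact (PySem.List.le_foldl_max LA (-1)).2 _ this
      have hFle : F ≤ M := by
        obtain ⟨k, hkK, hkeq⟩ := List.mem_map.mp hFmem
        by_cases hz : scanA (a0 :: t0) k 0 0 ≤ 0
        · -- F = 0 and M ≥ v ≥ 0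
          have hv0 : 0 ≤ v := by
            have : v ∈ v :: t := by simp
            rw [hvt] at this
            obtain ⟨k', _, hk'⟩ := List.mem_map.mp this
            rw [← hk']; exact scanv_nonneg _ _
          have := (PySem.List.le_foldl_max t v).1
          omega
        · -- the maximal scan belongs to a key of the count dict
          have hkmem : k ∈ st.2.keys := by
            by_contra hnk
            have : st.2.getD k 0 = 0 := by
              rw [PySem.Dict.getD_of_not_contains]
              rw [← Bool.not_eq_true, PySem.Dict.contains_iff_mem_keys]
              exact hnk
            rw [hB k] at this
            omega
          have : scanA (a0 :: t0) k 0 0 ∈ v :: t := by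
            rw [hvt]; exact List.mem_map_of_mem hkmem
          rw [← hkeq]
          rcases List.mem_cons.mp this with h | h
          · rw [h]; exact (PySem.List.le_foldl_max t v).1
          · exact (PySem.List.le_foldl_max t v).2 _ h
      have hFM : F = M := le_antisymm hFle hMle
      rw [hM, ← hFM]
      have : ¬ F = -1 := by omega
      rw [if_neg this]
      ring

-- ===== VERDICT (by name: the statement is the Claim_ definition above) =====
theorem solution_spec : Claim_equal_solution := by
  intro a _
  unfold Spec_solution
  exact main_eq a
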